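-- pv_equiv track=rewrite | github.com/rmb122/DataStructure | 结课作业.py | sharpifyRGBA
-- ===== SOURCE A (Python) =====
-- def sharpifyRGBA(piexls):
--     newPiexls = list()
--     laplaTemplate = [-1, -1, -1, -1, 9, -1, -1, -1, -1]
--     overfolw = lambda x: x if x <= 255 else 255
--     underflow = lambda x: x if x >= 0 else 0
--     for x in range(1, len(piexls) - 1):
--         temp = list()
--         for y in range(1, len(piexls[x]) - 1):
--             R, G, B = 0, 0, 0
--             curr = 0
--             for xShift in range(-1, 2):
--                 for yShift in range(-1, 2):
--                     R += (piexls[x + xShift][y + yShift][0] * laplaTemplate[curr])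
--                     G += (piexls[x + xShift][y + yShift][1] * laplaTemplate[curr])
--                     B += (piexls[x + xShift][y + yShift][2] * laplaTemplate[curr])
--                     curr += 1
--             R = overfolw(underflow(R))
--             G = overfolw(underflow(G))
--             B = overfolw(underflow(B))
--             temp.append((R, G, B, piexls[x][y][3]))
--         newPiexls.append(temp)
--     return newPiexls
-- ===== SOURCE B (Python) =====
-- def sharpifyRGBA(piexls):
--     out = []
--     for x in range(1, len(piexls) - 1):
--         n = len(piexls[x])
--         row = []
--         if n >= 3:
--             # vertical column sums over the three rows, then a horizontal sliding window
--             vs = [[piexls[x-1][j][c] + piexls[x][j][c] + piexls[x+1][j][c] for c in range(3)]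
--                   for j in range(n)]
--             s = [vs[0][c] + vs[1][c] + vs[2][c] for c in range(3)]
--             for y in range(1, n - 1):
--                 px = [min(255, max(0, 10 * piexls[x][y][c] - s[c])) for c in range(3)]
--                 row.append((px[0], px[1], px[2], piexls[x][y][3]))
--                 if y + 2 < n:
--                     s = [s[c] - vs[y-1][c] + vs[y+2][c] for c in range(3)]
--         out.append(row)
--     return out
-- ===== Notes on version B (the rewrite author's own statement) =====
-- stated objective: alternative
-- what changed: Replaces the per-pixel 9-step template multiply-add with a separable sliding-window scheme: per row strip it precomputes vertical 3-row column sums once, keeps a running horizontal 3-column window sum updated in O(1) per pixel (subtract the leaving column, add the entering one), and derives each channel as clamp(10*center - windowSum).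
import Mathlib
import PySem

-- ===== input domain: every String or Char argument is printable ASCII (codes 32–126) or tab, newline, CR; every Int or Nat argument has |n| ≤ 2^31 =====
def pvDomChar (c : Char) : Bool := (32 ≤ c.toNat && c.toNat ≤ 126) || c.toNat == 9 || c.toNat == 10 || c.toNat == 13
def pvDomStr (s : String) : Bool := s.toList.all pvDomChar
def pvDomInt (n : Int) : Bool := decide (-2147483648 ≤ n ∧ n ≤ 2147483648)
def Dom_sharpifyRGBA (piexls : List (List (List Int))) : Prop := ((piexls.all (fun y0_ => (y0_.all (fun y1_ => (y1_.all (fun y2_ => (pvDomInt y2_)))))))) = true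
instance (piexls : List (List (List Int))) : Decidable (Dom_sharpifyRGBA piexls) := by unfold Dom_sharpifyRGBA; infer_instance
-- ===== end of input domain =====

-- B replaces the 9-step template multiply-add per pixel by a separable sliding-window scheme
-- (vertical 3-row column sums, then an O(1)-update horizontal window and clamp(10*center - window)).

-- ===== PORT A =====
def sharpifyRGBA (piexls : List (List (List Int))) : List (List (List Int)) :=
  let laplaTemplate : List Int := [-1, -1, -1, -1, 9, -1, -1, -1, -1]
  let overfolw : Int → Int := fun x => if x ≤ 255 then x else 255
  let underflow : Int → Int := fun x => if x ≥ 0 then x else 0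
  (PySem.List.pyRange 1 ((piexls.length : Int) - 1) 1).foldl (fun newPiexls x =>
    let temp := (PySem.List.pyRange 1 (((PySem.List.pyGetD piexls x []).length : Int) - 1) 1).foldl
      (fun temp y =>
        let st := (PySem.List.pyRange (-1) 2 1).foldl (fun (st : Int × Int × Int × Int) xShift =>
          (PySem.List.pyRange (-1) 2 1).foldl (fun (st : Int × Int × Int × Int) yShift =>
            let px := PySem.List.pyGetD (PySem.List.pyGetD piexls (x + xShift) []) (y + yShift) []
            let t := PySem.List.pyGetD laplaTemplate st.2.2.2 0
            (st.1 + PySem.List.pyGetD px 0 0 * t,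
             st.2.1 + PySem.List.pyGetD px 1 0 * t,
             st.2.2.1 + PySem.List.pyGetD px 2 0 * t,
             st.2.2.2 + 1)) st) ((0 : Int), (0 : Int), (0 : Int), (0 : Int))
        let R := overfolw (underflow st.1)
        let G := overfolw (underflow st.2.1)
        let B := overfolw (underflow st.2.2.1)
        temp ++ [[R, G, B, PySem.List.pyGetD (PySem.List.pyGetD (PySem.List.pyGetD piexls x []) y []) 3 0]]) []
    newPiexls ++ [temp]) []

-- ===== PORT B =====
def sharpifyRGBA_alt (piexls : List (List (List Int))) : List (List (List Int)) :=
  (PySem.List.pyRange 1 ((piexls.length : Int) - 1) 1).foldl (fun out x =>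
    let n : Int := ((PySem.List.pyGetD piexls x []).length : Int)
    let row : List (List Int) :=
      if 3 ≤ n then
        let vs := (PySem.List.pyRange 0 n 1).map (fun j =>
          (PySem.List.pyRange 0 3 1).map (fun c =>
            PySem.List.pyGetD (PySem.List.pyGetD (PySem.List.pyGetD piexls (x - 1) []) j []) c 0 +
            PySem.List.pyGetD (PySem.List.pyGetD (PySem.List.pyGetD piexls x []) j []) c 0 +
            PySem.List.pyGetD (PySem.List.pyGetD (PySem.List.pyGetD piexls (x + 1) []) j []) c 0))
        let s0 := (PySem.List.pyRange 0 3 1).map (fun c =>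
          PySem.List.pyGetD (PySem.List.pyGetD vs 0 []) c 0 +
          PySem.List.pyGetD (PySem.List.pyGetD vs 1 []) c 0 +
          PySem.List.pyGetD (PySem.List.pyGetD vs 2 []) c 0)
        ((PySem.List.pyRange 1 (n - 1) 1).foldl (fun (st : List (List Int) × List Int) y =>
          let s := st.2
          let px := (PySem.List.pyRange 0 3 1).map (fun c =>
            min 255 (max 0 (10 * PySem.List.pyGetD (PySem.List.pyGetD (PySem.List.pyGetD piexls x []) y []) c 0 -
              PySem.List.pyGetD s c 0)))
          let row' := st.1 ++ [[PySem.List.pyGetD px 0 0, PySem.List.pyGetD px 1 0, PySem.List.pyGetD px 2 0,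
            PySem.List.pyGetD (PySem.List.pyGetD (PySem.List.pyGetD piexls x []) y []) 3 0]]
          let s' := if y + 2 < n then
              (PySem.List.pyRange 0 3 1).map (fun c =>
                PySem.List.pyGetD s c 0 -
                PySem.List.pyGetD (PySem.List.pyGetD vs (y - 1) []) c 0 +
                PySem.List.pyGetD (PySem.List.pyGetD vs (y + 2) []) c 0)
            else s
          (row', s')) (([] : List (List Int)), s0)).1
      else []
    out ++ [row]) []

-- ===== PRECONDITION & SPEC =====
-- Pre_ excludes exactly the inputs on which A raises IndexError: an interior pixel whose
-- 3x3 window reaches past the end of a neighbouring row, a window pixel with fewer than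
-- 3 channels, or a centre pixel with no alpha channel (fewer than 4 entries).
def Pre_sharpifyRGBA (piexls : List (List (List Int))) : Prop :=
  ∀ x ∈ PySem.List.pyRange 1 ((piexls.length : Int) - 1) 1,
    ∀ y ∈ PySem.List.pyRange 1 (((PySem.List.pyGetD piexls x []).length : Int) - 1) 1,
      (∀ dx ∈ [(-1 : Int), 0, 1], ∀ dy ∈ [(-1 : Int), 0, 1],
        PySem.Raise.InRange (PySem.List.pyGetD piexls (x + dx) []).length (y + dy) ∧
        3 ≤ (PySem.List.pyGetD (PySem.List.pyGetD piexls (x + dx) []) (y + dy) []).length) ∧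
      4 ≤ (PySem.List.pyGetD (PySem.List.pyGetD piexls x []) y []).length
instance (piexls : List (List (List Int))) : Decidable (Pre_sharpifyRGBA piexls) := by
  unfold Pre_sharpifyRGBA; infer_instance

def pvWitness_sharpifyRGBA : List (List (List Int)) :=
  [[[1,2,3,4],[5,6,7,8],[9,10,11,12]],
   [[13,14,15,16],[17,300,18,19],[20,21,22,23]],
   [[24,25,26,27],[28,29,30,31],[32,33,34,35]]]

def Spec_sharpifyRGBA (piexls : List (List (List Int))) (out : List (List (List Int))) : Prop := out = sharpifyRGBA_alt piexls
instance (piexls : List (List (List Int))) (out : List (List (List Int))) : Decidable (Spec_sharpifyRGBA piexls out) := by unfold Spec_sharpifyRGBA; infer_instance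

-- ===== CLAIM (what is proved, stated in full; the proofs are below) =====
def Claim_equal_sharpifyRGBA : Prop := ∀ (piexls : List (List (List Int))), Dom_sharpifyRGBA piexls → Pre_sharpifyRGBA piexls → Spec_sharpifyRGBA piexls (sharpifyRGBA piexls)

-- ===== LEMMAS AND PROOFS =====

theorem pv_witness_ok : Dom_sharpifyRGBA pvWitness_sharpifyRGBA ∧ Pre_sharpifyRGBA pvWitness_sharpifyRGBA := by
  decide

-- channel value at (row x, column j, channel c), Python-default 0 out of range
def pvPg (p : List (List (List Int))) (x j c : Int) : Int :=
  PySem.List.pyGetD (PySem.List.pyGetD (PySem.List.pyGetD p x []) j []) c 0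

-- vertical 3-row column sum
def pvCol (p : List (List (List Int))) (x j c : Int) : Int :=
  pvPg p (x - 1) j c + pvPg p x j c + pvPg p (x + 1) j c

-- full 3x3 window sum
def pvWin (p : List (List (List Int))) (x y c : Int) : Int :=
  pvCol p x (y - 1) c + pvCol p x y c + pvCol p x (y + 1) c

-- the common per-pixel value both ports produce
def pvPix (p : List (List (List Int))) (x y : Int) : List Int :=
  [min 255 (max 0 (10 * pvPg p x y 0 - pvWin p x y 0)),
   min 255 (max 0 (10 * pvPg p x y 1 - pvWin p x y 1)),
   min 255 (max 0 (10 * pvPg p x y 2 - pvWin p x y 2)),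
   PySem.List.pyGetD (PySem.List.pyGetD (PySem.List.pyGetD p x []) y []) 3 0]

theorem pv_range3 : PySem.List.pyRange (-1) 2 1 = [-1, 0, 1] := by decide
theorem pv_range03 : PySem.List.pyRange 0 3 1 = [0, 1, 2] := by decide

theorem pv_clamp' (a b : Int) (h : a = b) :
    (if (if a ≥ 0 then a else 0) ≤ 255 then (if a ≥ 0 then a else 0) else (255 : Int))
      = min 255 (max 0 b) := by subst h; split_ifs <;> omega


theorem pv_addneg (z : Int) : z + -1 = z - 1 := by ring

theorem pv_t0 : PySem.List.pyGetD [(-1:Int),-1,-1,-1,9,-1,-1,-1,-1] 0 0 = -1 := by decide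
theorem pv_t1 : PySem.List.pyGetD [(-1:Int),-1,-1,-1,9,-1,-1,-1,-1] 1 0 = -1 := by decide
theorem pv_t2 : PySem.List.pyGetD [(-1:Int),-1,-1,-1,9,-1,-1,-1,-1] 2 0 = -1 := by decide
theorem pv_t3 : PySem.List.pyGetD [(-1:Int),-1,-1,-1,9,-1,-1,-1,-1] 3 0 = -1 := by decide
theorem pv_t4 : PySem.List.pyGetD [(-1:Int),-1,-1,-1,9,-1,-1,-1,-1] 4 0 = 9 := by decide
theorem pv_t5 : PySem.List.pyGetD [(-1:Int),-1,-1,-1,9,-1,-1,-1,-1] 5 0 = -1 := by decide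
theorem pv_t6 : PySem.List.pyGetD [(-1:Int),-1,-1,-1,9,-1,-1,-1,-1] 6 0 = -1 := by decide
theorem pv_t7 : PySem.List.pyGetD [(-1:Int),-1,-1,-1,9,-1,-1,-1,-1] 7 0 = -1 := by decide
theorem pv_t8 : PySem.List.pyGetD [(-1:Int),-1,-1,-1,9,-1,-1,-1,-1] 8 0 = -1 := by decide

-- A's per-pixel 9-step template accumulator equals the common normal form pvPix
theorem pv_pixelA_eq (piexls : List (List (List Int))) (x y : Int) :
    (let laplaTemplate : List Int := [-1, -1, -1, -1, 9, -1, -1, -1, -1]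
     let overfolw : Int → Int := fun v => if v ≤ 255 then v else 255
     let underflow : Int → Int := fun v => if v ≥ 0 then v else 0
     let st := (PySem.List.pyRange (-1) 2 1).foldl (fun (st : Int × Int × Int × Int) xShift =>
          (PySem.List.pyRange (-1) 2 1).foldl (fun (st : Int × Int × Int × Int) yShift =>
            let px := PySem.List.pyGetD (PySem.List.pyGetD piexls (x + xShift) []) (y + yShift) []
            let t := PySem.List.pyGetD laplaTemplate st.2.2.2 0
            (st.1 + PySem.List.pyGetD px 0 0 * t,
             st.2.1 + PySem.List.pyGetD px 1 0 * t,
             st.2.2.1 + PySem.List.pyGetD px 2 0 * t,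
             st.2.2.2 + 1)) st) ((0 : Int), (0 : Int), (0 : Int), (0 : Int))
     [overfolw (underflow st.1), overfolw (underflow st.2.1), overfolw (underflow st.2.2.1),
      PySem.List.pyGetD (PySem.List.pyGetD (PySem.List.pyGetD piexls x []) y []) 3 0])
    = pvPix piexls x y := by
  set_option maxHeartbeats 2000000 in
  simp only [pv_range3, List.foldl_cons, List.foldl_nil, Int.reduceAdd, Int.reduceNeg,
    pv_t0, pv_t1, pv_t2, pv_t3, pv_t4, pv_t5, pv_t6, pv_t7, pv_t8, add_zero, pv_addneg,
    pvPix, pvWin, pvCol, pvPg]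
  simp only [List.cons.injEq]
  refine ⟨?_, ?_, ?_, trivial⟩ <;> (apply pv_clamp'; ring)


theorem pv_ix0 (a b c : Int) : PySem.List.pyGetD [a,b,c] (0:Int) 0 = a := by
  simp [PySem.List.pyGetD, PySem.List.pyGet?, PySem.List.pyIdx?]
theorem pv_ix1 (a b c : Int) : PySem.List.pyGetD [a,b,c] (1:Int) 0 = b := by
  simp [PySem.List.pyGetD, PySem.List.pyGet?, PySem.List.pyIdx?]
theorem pv_ix2 (a b c : Int) : PySem.List.pyGetD [a,b,c] (2:Int) 0 = c := by
  simp [PySem.List.pyGetD, PySem.List.pyGet?, PySem.List.pyIdx?]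

-- the canonical result both ports compute
def pvCanon (p : List (List (List Int))) : List (List (List Int)) :=
  (PySem.List.pyRange 1 ((p.length : Int) - 1) 1).map (fun x =>
    (PySem.List.pyRange 1 (((PySem.List.pyGetD p x []).length : Int) - 1) 1).map (pvPix p x))

theorem pv_A_canon (p : List (List (List Int))) : sharpifyRGBA p = pvCanon p := by
  unfold sharpifyRGBA pvCanon
  rw [PySem.List.foldl_append_singleton_eq_map, List.nil_append]
  apply List.map_congr_left
  intro x _
  rw [PySem.List.foldl_append_singleton_eq_map, List.nil_append]
  apply List.map_congr_left
  intro y _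
  exact pv_pixelA_eq p x y

-- lookup into the precomputed column-sum table
theorem pv_vs_get (p : List (List (List Int))) (x n j : Int) (h0 : 0 ≤ j) (h1 : j < n) :
    PySem.List.pyGetD ((PySem.List.pyRange 0 n 1).map (fun j =>
      (PySem.List.pyRange 0 3 1).map (fun c =>
        PySem.List.pyGetD (PySem.List.pyGetD (PySem.List.pyGetD p (x - 1) []) j []) c 0 +
        PySem.List.pyGetD (PySem.List.pyGetD (PySem.List.pyGetD p x []) j []) c 0 +
        PySem.List.pyGetD (PySem.List.pyGetD (PySem.List.pyGetD p (x + 1) []) j []) c 0))) j []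
    = [pvCol p x j 0, pvCol p x j 1, pvCol p x j 2] := by
  rw [PySem.List.pyGetD_map_pyRange_of_nonneg _ n j [] h0 h1]
  simp [pv_range03, pvCol, pvPg]

-- invariant of B's sliding-window fold: the carried s is the window sum at the current column
theorem pv_fold_inv (p : List (List (List Int))) (x n : Int) (vs : List (List Int))
    (hvs : ∀ j : Int, 0 ≤ j → j < n →
      PySem.List.pyGetD vs j [] = [pvCol p x j 0, pvCol p x j 1, pvCol p x j 2]) :
    ∀ (k : ℕ) (y : Int) (acc : List (List Int)) (s : List Int),
      1 ≤ y → y + k = n - 1 →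
      (k ≠ 0 → s = [pvWin p x y 0, pvWin p x y 1, pvWin p x y 2]) →
      ((PySem.List.pyRange y (n - 1) 1).foldl (fun (st : List (List Int) × List Int) y =>
          let s := st.2
          let px := (PySem.List.pyRange 0 3 1).map (fun c =>
            min 255 (max 0 (10 * PySem.List.pyGetD (PySem.List.pyGetD (PySem.List.pyGetD p x []) y []) c 0 -
              PySem.List.pyGetD s c 0)))
          let row' := st.1 ++ [[PySem.List.pyGetD px 0 0, PySem.List.pyGetD px 1 0, PySem.List.pyGetD px 2 0,
            PySem.List.pyGetD (PySem.List.pyGetD (PySem.List.pyGetD p x []) y []) 3 0]]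
          let s' := if y + 2 < n then
              (PySem.List.pyRange 0 3 1).map (fun c =>
                PySem.List.pyGetD s c 0 -
                PySem.List.pyGetD (PySem.List.pyGetD vs (y - 1) []) c 0 +
                PySem.List.pyGetD (PySem.List.pyGetD vs (y + 2) []) c 0)
            else s
          (row', s')) (acc, s)).1
        = acc ++ (PySem.List.pyRange y (n - 1) 1).map (pvPix p x) := by
  intro k
  induction k with
  | zero =>
    intro y acc s h1 hk _
    rw [show PySem.List.pyRange y (n - 1) 1 = [] from PySem.List.pyRange_one_eq_nil (by omega)]
    simp
  | succ k ih =>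
    intro y acc s h1 hk hs
    have hs' := hs (Nat.succ_ne_zero k)
    subst hs'
    rw [show PySem.List.pyRange y (n - 1) 1 = y :: PySem.List.pyRange (y + 1) (n - 1) 1 from
      PySem.List.pyRange_one_cons (by omega)]
    rw [List.foldl_cons, List.map_cons]
    dsimp only
    have hpix : [PySem.List.pyGetD ((PySem.List.pyRange 0 3 1).map (fun c =>
            min 255 (max 0 (10 * PySem.List.pyGetD (PySem.List.pyGetD (PySem.List.pyGetD p x []) y []) c 0 -
              PySem.List.pyGetD [pvWin p x y 0, pvWin p x y 1, pvWin p x y 2] c 0)))) 0 0,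
          PySem.List.pyGetD ((PySem.List.pyRange 0 3 1).map (fun c =>
            min 255 (max 0 (10 * PySem.List.pyGetD (PySem.List.pyGetD (PySem.List.pyGetD p x []) y []) c 0 -
              PySem.List.pyGetD [pvWin p x y 0, pvWin p x y 1, pvWin p x y 2] c 0)))) 1 0,
          PySem.List.pyGetD ((PySem.List.pyRange 0 3 1).map (fun c =>
            min 255 (max 0 (10 * PySem.List.pyGetD (PySem.List.pyGetD (PySem.List.pyGetD p x []) y []) c 0 -
              PySem.List.pyGetD [pvWin p x y 0, pvWin p x y 1, pvWin p x y 2] c 0)))) 2 0,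
          PySem.List.pyGetD (PySem.List.pyGetD (PySem.List.pyGetD p x []) y []) 3 0]
        = pvPix p x y := by
      simp only [pv_range03, List.map_cons, List.map_nil, pv_ix0, pv_ix1, pv_ix2, pvPix, pvPg]
    rw [hpix]
    rw [ih (y + 1) (acc ++ [pvPix p x y]) _ (by omega) (by omega) ?_]
    · simp
    · intro hk0
      have hy2 : y + 2 < n := by omega
      rw [if_pos hy2]
      rw [hvs (y - 1) (by omega) (by omega), hvs (y + 2) (by omega) hy2]
      simp only [pv_range03, List.map_cons, List.map_nil, pv_ix0, pv_ix1, pv_ix2]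
      have e1 : y + 1 - 1 = y := by ring
      have e2 : y + 1 + 1 = y + 2 := by ring
      unfold pvWin
      rw [e1, e2]
      simp only [List.cons.injEq, and_true]
      exact ⟨by ring, by ring, by ring⟩

theorem pv_B_canon (p : List (List (List Int))) : sharpifyRGBA_alt p = pvCanon p := by
  unfold sharpifyRGBA_alt pvCanon
  rw [PySem.List.foldl_append_singleton_eq_map, List.nil_append]
  apply List.map_congr_left
  intro x _
  dsimp only
  by_cases h3 : 3 ≤ ((PySem.List.pyGetD p x []).length : Int)
  · rw [if_pos h3]
    have hvs := fun j h0 h1 => pv_vs_get p x ((PySem.List.pyGetD p x []).length : Int) j h0 h1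
    refine Eq.trans (pv_fold_inv p x ((PySem.List.pyGetD p x []).length : Int) _ hvs
      (((PySem.List.pyGetD p x []).length : Int) - 2).toNat 1 [] _ le_rfl (by omega)
      (fun _ => ?_)) (List.nil_append _)
    rw [hvs 0 (by omega) (by omega), hvs 1 (by omega) (by omega), hvs 2 (by omega) (by omega)]
    simp only [pv_range03, List.map_cons, List.map_nil, pv_ix0, pv_ix1, pv_ix2]
    unfold pvWin
    norm_num
  · rw [if_neg h3]
    rw [PySem.List.pyRange_one_eq_nil (by omega)]
    simp

-- ===== VERDICT (by name: the statement is the Claim_ definition above) =====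
theorem sharpifyRGBA_spec : Claim_equal_sharpifyRGBA := by
  intro p _ _
  show sharpifyRGBA p = sharpifyRGBA_alt p
  rw [pv_A_canon, pv_B_canon]
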